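-- pv_equiv track=rewrite | github.com/shafinsiddique/algorithms-datastructures | leetcode/strings.py | attendancerecord
-- ===== SOURCE A (Python) =====
-- def attendancerecord(s):
--     """Given an attendance record, return whether the student is eligible
--     for an award.
--     """
--
--     if s.count("A") > 1:
--         return False
--
--     else:
--         for x in range(len(s)-2):
--             if s[x] == "L" and s[x+1] == "L" and s[x+2] == "L":
--                 return False
--
--     return True
-- ===== SOURCE B (Python) =====
-- def attendancerecord(s):
--     """Single pass with running counters: absence count and current 'L' run,
--     early-exiting as soon as either rule is violated."""
--     a_count = 0
--     run = 0
--     for ch in s: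
--         if ch == 'A':
--             a_count += 1
--             if a_count > 1:
--                 return False
--             run = 0
--         elif ch == 'L':
--             run += 1
--             if run == 3:
--                 return False
--         else:
--             run = 0
--     return True
-- ===== Notes on version B (the rewrite author's own statement) =====
-- stated objective: alternative
-- what changed: Replaced A's two separate scans (a full count('A') pass plus an index loop testing s[x..x+2] for 'LLL') by one left-to-right pass maintaining an absence counter and the current consecutive-'L' run length, with early exit on the first violation.
import Mathlib
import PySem

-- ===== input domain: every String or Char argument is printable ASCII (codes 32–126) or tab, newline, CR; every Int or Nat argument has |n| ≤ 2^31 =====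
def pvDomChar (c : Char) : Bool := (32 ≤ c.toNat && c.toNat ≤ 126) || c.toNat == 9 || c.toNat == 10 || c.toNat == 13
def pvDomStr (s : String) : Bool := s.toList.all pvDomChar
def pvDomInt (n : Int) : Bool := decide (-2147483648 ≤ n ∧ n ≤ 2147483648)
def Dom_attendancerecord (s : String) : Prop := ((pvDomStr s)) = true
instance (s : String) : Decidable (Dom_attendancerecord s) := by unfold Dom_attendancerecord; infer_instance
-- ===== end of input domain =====

-- B replaces A's two scans (count('A') plus a triple-L index loop) by one pass with running counters; alternative decomposition, same cost.

-- ===== PORT A =====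
-- the 'for x in range(len(s)-2)' loop with its early 'return False'
def pvALoop (s : String) : List Int → Bool
  | [] => true
  | x :: rest =>
    if PySem.Str.pyGet? s x = some 'L' ∧ PySem.Str.pyGet? s (x+1) = some 'L'
        ∧ PySem.Str.pyGet? s (x+2) = some 'L' then false
    else pvALoop s rest

def attendancerecord (s : String) : Bool :=
  if PySem.Str.count s "A" > 1 then false
  else pvALoop s (PySem.List.pyRange 0 (PySem.Str.len s - 2) 1)

-- ===== PORT B =====
-- one pass: a_count = absences so far, run = current consecutive-'L' run
def pvBLoop : List Char → Int → Int → Bool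
  | [], _, _ => true
  | c :: rest, a, run =>
    if c = 'A' then
      if a + 1 > 1 then false else pvBLoop rest (a + 1) 0
    else if c = 'L' then
      if run + 1 = 3 then false else pvBLoop rest a (run + 1)
    else pvBLoop rest a 0

def attendancerecord_alt (s : String) : Bool := pvBLoop s.toList 0 0

-- ===== PRECONDITION & SPEC =====
def Spec_attendancerecord (s : String) (out : Bool) : Prop := out = attendancerecord_alt s
instance (s : String) (out : Bool) : Decidable (Spec_attendancerecord s out) := by unfold Spec_attendancerecord; infer_instance

-- ===== CLAIM (what is proved, stated in full; the proofs are below) =====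
def Claim_equal_attendancerecord : Prop := ∀ (s : String), Dom_attendancerecord s → Spec_attendancerecord s (attendancerecord s)

-- ===== LEMMAS AND PROOFS =====

/-- Reference predicate: no three consecutive 'L' in the list. -/
def pvNoTri : List Char → Bool
  | a :: b :: c :: rest => if a = 'L' ∧ b = 'L' ∧ c = 'L' then false else pvNoTri (b :: c :: rest)
  | _ => true

lemma pvNoTri_short (l : List Char) (h : l.length ≤ 2) : pvNoTri l = true := by
  match l, h with
  | [], _ => rfl
  | [_], _ => rfl
  | [_, _], _ => rfl

lemma pvNoTri_cons_ne (c : Char) (t : List Char) (hc : c ≠ 'L') :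
    pvNoTri (c :: t) = pvNoTri t := by
  match t with
  | [] => rfl
  | [_] => rfl
  | b :: d :: r => simp [pvNoTri, hc]

-- Python string count with a single-character needle is List.count
lemma pvCountGo_single (c : Char) :
    ∀ (fuel : Nat) (l : List Char) (acc : Nat), l.length ≤ fuel →
      PySem.Chars.count.go [c] fuel l acc = acc + l.count c := by
  intro fuel
  induction fuel with
  | zero =>
    intro l acc h
    have : l = [] := List.eq_nil_of_length_eq_zero (Nat.le_zero.mp h)
    subst this; simp [PySem.Chars.count.go]
  | succ n ih =>
    intro l acc h
    match l with
    | [] => simp [PySem.Chars.count.go]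
    | d :: t =>
      by_cases hd : d = c
      · subst hd
        have : List.isPrefixOf [d] (d :: t) = true := by simp [List.isPrefixOf]
        simp only [PySem.Chars.count.go, this, if_pos]
        simp only [List.length_cons, List.length_nil, Nat.zero_add, List.drop_succ_cons, List.drop_zero]
        rw [ih t (acc + 1) (by simpa using h)]
        simp
        omega
      · have : List.isPrefixOf [c] (d :: t) = false := by
          simp [List.isPrefixOf]; exact fun h' => absurd h'.symm hd
        simp only [PySem.Chars.count.go, this]
        rw [if_neg (by simp)]
        rw [ih t acc (by simpa using h)]
        simp [hd]

lemma pvStrCountA (s : String) : PySem.Str.count s "A" = s.toList.count 'A' := by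
  rw [PySem.Str.count_eq]
  show PySem.Chars.count s.toList ['A'] = _
  unfold PySem.Chars.count
  simp only [List.isEmpty_cons, if_false, Bool.false_eq_true]
  simpa using pvCountGo_single 'A' s.toList.length s.toList 0 le_rfl

-- A's index loop computes pvNoTri of the suffix starting at k.
lemma pvALoop_eq (s : String) :
    ∀ (m k : Nat), s.toList.length ≤ k + m →
      pvALoop s (PySem.List.pyRange (k : Int) ((s.toList.length : Int) - 2) 1) =
        pvNoTri (s.toList.drop k) := by
  intro m
  induction m with
  | zero =>
    intro k h
    simp only [Nat.add_zero] at h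
    rw [PySem.List.pyRange_one_eq_nil (by omega)]
    rw [List.drop_eq_nil_of_le h]
    rfl
  | succ n ih =>
    intro k h
    by_cases hk : k + 2 < s.toList.length
    · rw [PySem.List.pyRange_one_cons (by omega)]
      have h0 : k < s.toList.length := by omega
      have h1 : k + 1 < s.toList.length := by omega
      have hg0 : PySem.Str.pyGet? s (k : Int) = s.toList[k]? := PySem.Str.pyGet?_natCast s k
      have hg1' : PySem.Str.pyGet? s (((k + 1 : Nat)) : Int) = s.toList[k+1]? :=
        PySem.Str.pyGet?_natCast s (k+1)
      have hg2 : PySem.Str.pyGet? s ((k : Int) + 2) = s.toList[k+2]? := by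
        rw [show ((k : Int) + 2) = ((k + 2 : Nat) : Int) by push_cast; ring]
        exact PySem.Str.pyGet?_natCast s (k+2)
      have hd : s.toList.drop k = s.toList[k] :: s.toList[k+1] :: s.toList[k+2] :: s.toList.drop (k+3) := by
        rw [List.drop_eq_getElem_cons h0, List.drop_eq_getElem_cons h1,
            List.drop_eq_getElem_cons hk]
      rw [hd]
      show (if _ then false else pvALoop s _) = pvNoTri _
      rw [show ((k : Int) + 1) = (((k+1 : Nat) : Int)) by push_cast; ring]
      have ihs : pvALoop s (PySem.List.pyRange ((k+1 : Nat) : Int) ((s.toList.length : Int) - 2) 1)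
          = pvNoTri (s.toList.drop (k+1)) := ih (k+1) (by omega)
      rw [List.drop_eq_getElem_cons h1, List.drop_eq_getElem_cons hk] at ihs
      simp only [hg0, hg1', hg2, List.getElem?_eq_getElem h0, List.getElem?_eq_getElem h1,
        List.getElem?_eq_getElem hk, pvNoTri]
      simp only [Option.some.injEq]
      rw [ihs]
    · rw [PySem.List.pyRange_one_eq_nil (by
        have hlenEq : s.toList.length = s.length := by simp
        omega)]
      rw [pvNoTri_short _ (by simp only [List.length_drop]; omega)]
      rfl

-- B's loop invariant: with a ≤ 1 absences seen and a pending run of run ≤ 2 'L's,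
-- it computes "total absences ≤ 1 and no triple-L in (run L's ++ rest)".
lemma pvBLoop_eq :
    ∀ (l : List Char) (a run : Nat), a ≤ 1 → run ≤ 2 →
      pvBLoop l (a : Int) (run : Int) =
        ((a + l.count 'A' ≤ 1 : Bool) && pvNoTri (List.replicate run 'L' ++ l)) := by
  intro l
  induction l with
  | nil =>
    intro a run ha hrun
    have h1 : pvNoTri (List.replicate run 'L') = true := by
      apply pvNoTri_short; simp; omega
    simp [pvBLoop, h1, ha, List.count_nil]
  | cons c t ih =>
    intro a run ha hrun
    by_cases hcA : c = 'A'
    · subst hcA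
      by_cases ha1 : a = 1
      · subst ha1
        have step : pvBLoop ('A' :: t) ((1 : Nat) : Int) ((run : Nat) : Int) = false := by
          norm_num [pvBLoop]
        rw [step]
        have hd : (decide ((1 : Nat) + ('A' :: t).count 'A' ≤ 1)) = false := by
          simp
        rw [hd, Bool.false_and]
      · have ha0 : a = 0 := by omega
        subst ha0
        have step : pvBLoop ('A' :: t) (((0 : Nat)) : Int) ((run : Nat) : Int)
            = pvBLoop t ((1 : Nat) : Int) ((0 : Nat) : Int) := by
          norm_num [pvBLoop]
        rw [step, ih 1 0 le_rfl (by omega)]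
        have hpre : pvNoTri (List.replicate run 'L' ++ 'A' :: t) = pvNoTri t := by
          interval_cases run
          · simpa using pvNoTri_cons_ne 'A' t (by decide)
          · show pvNoTri ('L' :: 'A' :: t) = pvNoTri t
            match t with
            | [] => rfl
            | d :: r =>
              rw [show pvNoTri ('L' :: 'A' :: d :: r) = pvNoTri ('A' :: d :: r) by
                    simp [pvNoTri]]
              exact pvNoTri_cons_ne 'A' (d :: r) (by decide)
          · show pvNoTri ('L' :: 'L' :: 'A' :: t) = pvNoTri t
            rw [show pvNoTri ('L' :: 'L' :: 'A' :: t) = pvNoTri ('L' :: 'A' :: t) by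
                  simp [pvNoTri]]
            match t with
            | [] => rfl
            | d :: r =>
              rw [show pvNoTri ('L' :: 'A' :: d :: r) = pvNoTri ('A' :: d :: r) by
                    simp [pvNoTri]]
              exact pvNoTri_cons_ne 'A' (d :: r) (by decide)
        rw [hpre]
        simp
    · by_cases hcL : c = 'L'
      · subst hcL
        have hrepl : List.replicate run 'L' ++ 'L' :: t = List.replicate (run + 1) 'L' ++ t := by
          rw [List.replicate_succ']; simp
        by_cases hr2 : run = 2
        · subst hr2
          have step : pvBLoop ('L' :: t) ((a : Nat) : Int) (((2 : Nat)) : Int) = false := by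
            simp only [pvBLoop, if_neg (by decide : ¬ (('L' : Char) = 'A'))]
            simp
          rw [step]
          have hno : pvNoTri (List.replicate 2 'L' ++ 'L' :: t) = false := by
            simp [List.replicate, pvNoTri]
          rw [hno, Bool.and_false]
        · have hr3 : ((run : Int) + 1 ≠ 3) := by omega
          have step : pvBLoop ('L' :: t) ((a : Nat) : Int) ((run : Nat) : Int)
              = pvBLoop t ((a : Nat) : Int) (((run : Nat) : Int) + 1) := by
            simp [pvBLoop, hr3]
          rw [step, show (((run : Nat) : Int) + 1) = ((run + 1 : Nat) : Int) by push_cast; ring,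
              ih a (run + 1) ha (by omega), hrepl]
          simp
      · have step : pvBLoop (c :: t) ((a : Nat) : Int) ((run : Nat) : Int)
            = pvBLoop t ((a : Nat) : Int) ((0 : Nat) : Int) := by
          simp [pvBLoop, hcA, hcL]
        rw [step, ih a 0 ha (by omega)]
        have hpre : pvNoTri (List.replicate run 'L' ++ c :: t) = pvNoTri t := by
          interval_cases run
          · simpa using pvNoTri_cons_ne c t hcL
          · show pvNoTri ('L' :: c :: t) = pvNoTri t
            match t with
            | [] => rfl
            | d :: r =>
              rw [show pvNoTri ('L' :: c :: d :: r) = pvNoTri (c :: d :: r) by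
                    simp [pvNoTri, hcL]]
              exact pvNoTri_cons_ne c (d :: r) hcL
          · show pvNoTri ('L' :: 'L' :: c :: t) = pvNoTri t
            rw [show pvNoTri ('L' :: 'L' :: c :: t) = pvNoTri ('L' :: c :: t) by
                  simp [pvNoTri, hcL]]
            match t with
            | [] => rfl
            | d :: r =>
              rw [show pvNoTri ('L' :: c :: d :: r) = pvNoTri (c :: d :: r) by
                    simp [pvNoTri, hcL]]
              exact pvNoTri_cons_ne c (d :: r) hcL
        rw [hpre]
        simp [hcA]

-- ===== VERDICT (by name: the statement is the Claim_ definition above) =====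
theorem attendancerecord_spec : Claim_equal_attendancerecord := by
  intro s _
  unfold Spec_attendancerecord attendancerecord attendancerecord_alt
  rw [pvStrCountA]
  have hB := pvBLoop_eq s.toList 0 0 (by omega) (by omega)
  simp only [Nat.cast_zero] at hB
  rw [hB]
  simp only [List.replicate, List.nil_append, Nat.zero_add]
  have hA := pvALoop_eq s (s.toList.length) 0 (by omega)
  simp only [Nat.cast_zero, List.drop_zero] at hA
  by_cases h : s.toList.count 'A' > 1
  · rw [if_pos h]
    have hd : (decide (s.toList.count 'A' ≤ 1)) = false := by
      simp; omega
    rw [hd, Bool.false_and]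
  · rw [if_neg h]
    have hlen : PySem.Str.len s = (s.toList.length : Int) := by simp [PySem.Str.len_eq]
    rw [hlen, hA]
    have hd : (decide (s.toList.count 'A' ≤ 1)) = true := by
      simp; omega
    rw [hd, Bool.true_and]
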